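-- pv_equiv track=rewrite | github.com/pypi-data/pypi-mirror-390 | packages/plexos-to-pypsa-converter/plexos_to_pypsa_converter-0.1.0.tar.gz/plexos_to_pypsa_converter-0.1.0/src/plexos_to_pypsa_converter/analysis/utils.py | format_carrier_name
-- ===== SOURCE A (Python) =====
-- def format_carrier_name(carrier: str) -> str:
--     """Format carrier name for display (nice_names equivalent).
--
--     Parameters
--     ----------
--     carrier : str
--         Carrier name
--
--     Returns
--     -------
--     str
--         Formatted carrier name
--     """
--     # Capitalize first letter of each word
--     words = carrier.split()
--     formatted = " ".join(word.capitalize() for word in words)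
--
--     # Special cases
--     replacements = {
--         "Pv": "PV",
--         "Ac": "AC",
--         "Dc": "DC",
--         "Phs": "PHS",
--         "Ocgt": "OCGT",
--         "Ccgt": "CCGT",
--         "H2": "H₂",  # Hydrogen with subscript
--         "Co2": "CO₂",  # CO2 with subscript
--     }
--
--     for old, new in replacements.items():
--         formatted = formatted.replace(old, new)
--
--     return formatted
-- ===== SOURCE B (Python) =====
-- _REPLACEMENTS = [
--     ("Pv", "PV"),
--     ("Ac", "AC"),
--     ("Dc", "DC"),
--     ("Phs", "PHS"),
--     ("Ocgt", "OCGT"),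
--     ("Ccgt", "CCGT"),
--     ("H2", "H\u2082"),
--     ("Co2", "CO\u2082"),
-- ]
--
--
-- def format_carrier_name(carrier: str) -> str:
--     """Format carrier name for display (nice_names equivalent)."""
--     s = " ".join(word.capitalize() for word in carrier.split())
--     out = []
--     i = 0
--     while i < len(s):
--         for old, new in _REPLACEMENTS:
--             if s.startswith(old, i):
--                 out.append(new)
--                 i += len(old)
--                 break
--         else:
--             out.append(s[i])
--             i += 1
--     return "".join(out)
-- ===== Notes on version B (the rewrite author's own statement) =====
-- stated objective: alternative
-- what changed: B replaces A's eight sequential whole-string str.replace passes by a single left-to-right scan that substitutes whichever key matches at the current position, so the string is traversed once instead of nine times.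
-- intended difference: On inputs containing a word that capitalizes to 'Ac'/'Dc' followed immediately by 'o2' or 'cgt' (e.g. 'aco2', 'dccgt'), A's sequential replaces cascade — the substituted 'AC'/'DC' accidentally forms a new key with the following letters, so A returns e.g. 'ACO₂'/'DCCGT' — while B returns 'ACo2'/'DCcgt', the intended value, since each replacement should apply to the original capitalized text and not to the output of a previous replacement. — e.g. on format_carrier_name("aco2"): A returns "ACO₂", B returns "ACo2"
import Mathlib
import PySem

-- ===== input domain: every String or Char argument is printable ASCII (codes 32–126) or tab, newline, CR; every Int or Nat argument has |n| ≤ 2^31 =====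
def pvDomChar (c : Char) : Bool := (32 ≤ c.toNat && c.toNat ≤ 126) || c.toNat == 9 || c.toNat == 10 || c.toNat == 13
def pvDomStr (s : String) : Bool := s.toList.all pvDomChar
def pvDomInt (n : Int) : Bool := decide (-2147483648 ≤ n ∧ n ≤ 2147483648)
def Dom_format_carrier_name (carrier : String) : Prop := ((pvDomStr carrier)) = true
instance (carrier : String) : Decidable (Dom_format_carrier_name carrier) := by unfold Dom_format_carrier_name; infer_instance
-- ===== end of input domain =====

-- B replaces A's eight sequential whole-string `.replace` passes by a single left-to-right
-- scan substituting whichever key matches at each position (alternative, same cost); on the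
-- exceptional cascade inputs described at D_ below, B returns the intended value where A's
-- sequential replaces chain.

-- ===== PORT A =====

-- str.capitalize(): first char title-cased, rest lowercased; exact on the ASCII domain
-- (title-case = upper-case there). Used by both ports, as both Pythons call .capitalize().
def pyCapitalize (w : List Char) : List Char :=
  match w with
  | [] => []
  | c :: t => PySem.Chars.upperChar c :: PySem.Chars.lower t

-- the `replacements` dict of A, in insertion order (items iteration order)
def pyReplacements : List (List Char × List Char) :=
  [(['P','v'], ['P','V']), (['A','c'], ['A','C']), (['D','c'], ['D','C']),
   (['P','h','s'], ['P','H','S']), (['O','c','g','t'], ['O','C','G','T']),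
   (['C','c','g','t'], ['C','C','G','T']), (['H','2'], ['H','₂']),
   (['C','o','2'], ['C','O','₂'])]

def format_carrier_name (carrier : String) : String :=
  let words := PySem.Chars.split₀ carrier.toList
  let formatted := PySem.Chars.join [' '] (words.map pyCapitalize)
  String.ofList (pyReplacements.foldl (fun s p => PySem.Chars.replace s p.1 p.2) formatted)

-- ===== PORT B =====

-- the while-loop of Source B: at each position try the keys in order (the for/break),
-- emit the first matching key's value and skip it, else copy one character
def bScan (s : List Char) : List Char :=
  match s with
  | [] => []
  | c :: t =>
    if List.isPrefixOf ['P','v'] (c :: t) then ['P','V'] ++ bScan (List.drop 2 (c :: t))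
    else if List.isPrefixOf ['A','c'] (c :: t) then ['A','C'] ++ bScan (List.drop 2 (c :: t))
    else if List.isPrefixOf ['D','c'] (c :: t) then ['D','C'] ++ bScan (List.drop 2 (c :: t))
    else if List.isPrefixOf ['P','h','s'] (c :: t) then ['P','H','S'] ++ bScan (List.drop 3 (c :: t))
    else if List.isPrefixOf ['O','c','g','t'] (c :: t) then ['O','C','G','T'] ++ bScan (List.drop 4 (c :: t))
    else if List.isPrefixOf ['C','c','g','t'] (c :: t) then ['C','C','G','T'] ++ bScan (List.drop 4 (c :: t))
    else if List.isPrefixOf ['H','2'] (c :: t) then ['H','₂'] ++ bScan (List.drop 2 (c :: t))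
    else if List.isPrefixOf ['C','o','2'] (c :: t) then ['C','O','₂'] ++ bScan (List.drop 3 (c :: t))
    else c :: bScan t
termination_by s.length
decreasing_by all_goals (simp only [List.length_drop, List.length_cons]; omega)

def format_carrier_name_alt (carrier : String) : String :=
  String.ofList (bScan (PySem.Chars.join [' ']
    ((PySem.Chars.split₀ carrier.toList).map pyCapitalize)))

-- ===== PRECONDITION & SPEC =====

-- helper for D_: a word that capitalizes to 'Ac'/'Dc' immediately followed by 'o2'/'cgt'
def cascadeWord : List Char → Bool
  | [] => false
  | c :: t =>
    (c == 'a' || c == 'A' || c == 'd' || c == 'D') &&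
    (List.isPrefixOf ['c','o','2'] (PySem.Chars.lower t) ||
     List.isPrefixOf ['c','c','g','t'] (PySem.Chars.lower t))

-- On inputs containing a word that capitalizes to 'Ac'/'Dc' followed immediately by 'o2'
-- or 'cgt' (e.g. 'aco2', 'dccgt'), A's sequential replaces cascade — the substituted
-- 'AC'/'DC' forms a new key with the following letters, so A returns e.g. 'ACO₂'/'DCCGT' —
-- while B returns 'ACo2'/'DCcgt', the intended value: each replacement should apply to the
-- original capitalized text, not to the output of a previous replacement.
def D_format_carrier_name (carrier : String) : Prop :=
  (PySem.Chars.split₀ carrier.toList).any cascadeWord = true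
instance (carrier : String) : Decidable (D_format_carrier_name carrier) := by
  unfold D_format_carrier_name; infer_instance

def Spec_format_carrier_name (carrier : String) (out : String) : Prop :=
  ¬ D_format_carrier_name carrier → out = format_carrier_name_alt carrier
instance (carrier : String) (out : String) : Decidable (Spec_format_carrier_name carrier out) := by
  unfold Spec_format_carrier_name; infer_instance

def pvDiffWitness_format_carrier_name : String := "aco2"
def pvDiffWitnessOut_format_carrier_name : String × String := ("ACO₂", "ACo2")

-- ===== CLAIM (what is proved, stated in full; the proofs are below) =====
def Claim_unchanged_format_carrier_name : Prop := ∀ (carrier : String), Dom_format_carrier_name carrier → Spec_format_carrier_name carrier (format_carrier_name carrier)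
def Claim_changed_format_carrier_name : Prop := Dom_format_carrier_name (pvDiffWitness_format_carrier_name) ∧ D_format_carrier_name (pvDiffWitness_format_carrier_name) ∧ format_carrier_name (pvDiffWitness_format_carrier_name) = pvDiffWitnessOut_format_carrier_name.1 ∧ format_carrier_name_alt (pvDiffWitness_format_carrier_name) = pvDiffWitnessOut_format_carrier_name.2 ∧ pvDiffWitnessOut_format_carrier_name.1 ≠ pvDiffWitnessOut_format_carrier_name.2
def Claim_exact_format_carrier_name : Prop := ∀ (carrier : String), Dom_format_carrier_name carrier → D_format_carrier_name carrier → format_carrier_name carrier ≠ format_carrier_name_alt carrier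

-- ===== LEMMAS AND PROOFS =====

-- A clean recursive characterization of Python's str.replace (= PySem.Chars.replace for
-- a nonempty pattern), used only in the proofs.
def rep (old new : List Char) : List Char → List Char
  | [] => []
  | c :: t =>
    if h : old.isPrefixOf (c :: t) = true ∧ old ≠ [] then
      new ++ rep old new ((c :: t).drop old.length)
    else
      c :: rep old new t
termination_by s => s.length
decreasing_by
  · simp only [List.length_drop, List.length_cons]
    have : old ≠ [] := h.2
    have : 1 ≤ old.length := by cases old <;> simp_all
    omega
  · simp

lemma rep_cons_neg (old new : List Char) (c : Char) (t : List Char)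
    (h : old.isPrefixOf (c :: t) = false) :
    rep old new (c :: t) = c :: rep old new t := by
  simp [rep, h]

lemma rep_cons_pos (old new : List Char) (c : Char) (t : List Char)
    (h : old.isPrefixOf (c :: t) = true) (ho : old ≠ []) :
    rep old new (c :: t) = new ++ rep old new ((c :: t).drop old.length) := by
  simp [rep, h, ho]

-- a key containing no space matches at a position iff it matches before the separator
lemma isPrefixOf_append_sep (k a b : List Char) (hs : ' ' ∉ k) :
    k.isPrefixOf (a ++ ' ' :: b) = k.isPrefixOf a := by
  by_cases hk : k.isPrefixOf a = true
  · rw [hk]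
    rw [List.isPrefixOf_iff_prefix] at hk ⊢
    exact hk.trans (List.prefix_append _ _)
  · rw [Bool.not_eq_true] at hk
    rw [hk, Bool.eq_false_iff]
    intro hcon
    rw [List.isPrefixOf_iff_prefix] at hcon
    by_cases hlen : k.length ≤ a.length
    · rw [Bool.eq_false_iff] at hk
      exact hk (by
        rw [List.isPrefixOf_iff_prefix]
        exact List.prefix_of_prefix_length_le hcon (List.prefix_append _ _) hlen)
    · push Not at hlen
      obtain ⟨r, hr⟩ := hcon
      apply hs
      have h1 : (k ++ r)[a.length]'(by rw [hr]; simp) = k[a.length]'(by omega) :=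
        List.getElem_append_left (by omega)
      have h0 : (k ++ r)[a.length]'(by rw [hr]; simp) = ' ' := by simp [hr]
      rw [h1] at h0
      exact h0 ▸ List.getElem_mem _

lemma rep_append_sep (old new : List Char) (ho : old ≠ []) (hs : ' ' ∉ old) :
    ∀ (a b : List Char), rep old new (a ++ ' ' :: b) = rep old new a ++ ' ' :: rep old new b := by
  have hlen : 1 ≤ old.length := by cases old <;> simp_all
  suffices H : ∀ (n : Nat) (a : List Char), a.length ≤ n → ∀ b,
      rep old new (a ++ ' ' :: b) = rep old new a ++ ' ' :: rep old new b by
    intro a b; exact H a.length a le_rfl b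
  intro n
  induction n with
  | zero =>
    intro a ha b
    have : a = [] := by cases a <;> simp_all
    subst this
    simp only [List.nil_append]
    rw [rep_cons_neg _ _ _ _ (by
      rw [show (' ' :: b : List Char) = [] ++ ' ' :: b by simp,
        isPrefixOf_append_sep _ _ _ hs]
      cases old <;> simp_all [List.isPrefixOf])]
    simp [rep]
  | succ n ih =>
    intro a ha b
    cases a with
    | nil =>
      simp only [List.nil_append]
      rw [rep_cons_neg _ _ _ _ (by
        rw [show (' ' :: b : List Char) = [] ++ ' ' :: b by simp,
          isPrefixOf_append_sep _ _ _ hs]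
        cases old <;> simp_all [List.isPrefixOf])]
      simp [rep]
    | cons c t =>
      by_cases hp : old.isPrefixOf (c :: t) = true
      · rw [show (c :: t) ++ ' ' :: b = c :: (t ++ ' ' :: b) by simp]
        rw [rep_cons_pos _ _ _ _ (by
          rw [show c :: (t ++ ' ' :: b) = (c :: t) ++ ' ' :: b by simp,
            isPrefixOf_append_sep _ _ _ hs]; exact hp) ho]
        rw [rep_cons_pos _ _ _ _ hp ho]
        have hlea : old.length ≤ (c :: t).length := by
          have := List.IsPrefix.length_le (List.isPrefixOf_iff_prefix.mp hp)
          simpa using this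
        have hdrop : (c :: (t ++ ' ' :: b)).drop old.length
            = (c :: t).drop old.length ++ ' ' :: b := by
          rw [show c :: (t ++ ' ' :: b) = (c :: t) ++ ' ' :: b by simp]
          exact List.drop_append_of_le_length hlea
        rw [hdrop]
        rw [ih _ (by
          simp only [List.length_drop, List.length_cons] at *
          omega)]
        simp
      · rw [Bool.not_eq_true] at hp
        rw [show (c :: t) ++ ' ' :: b = c :: (t ++ ' ' :: b) by simp]
        rw [rep_cons_neg _ _ _ _ (by
          rw [show c :: (t ++ ' ' :: b) = (c :: t) ++ ' ' :: b by simp,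
            isPrefixOf_append_sep _ _ _ hs]; exact hp)]
        rw [rep_cons_neg _ _ _ _ hp]
        rw [ih _ (by simp at ha ⊢; omega)]
        simp

lemma rep_of_not_mem (o : Char) (os new : List Char) :
    ∀ (s : List Char), o ∉ s → rep (o :: os) new s = s := by
  intro s
  induction s with
  | nil => intro _; simp [rep]
  | cons c t ih =>
    intro h
    have hne : c ≠ o := fun hc => h (hc ▸ List.mem_cons_self ..)
    have hp : (o :: os).isPrefixOf (c :: t) = false := by
      simp [List.isPrefixOf]
      intro hoc
      exact absurd hoc.symm hne
    rw [rep_cons_neg _ _ _ _ hp, ih (fun hm => h (List.mem_cons_of_mem _ hm))]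

lemma go_eq (old new : List Char) (ho : old ≠ []) :
    ∀ (fuel : Nat) (l acc : List Char), l.length ≤ fuel →
      PySem.Chars.replace.go old new fuel l acc = acc.reverse ++ rep old new l := by
  intro fuel
  induction fuel with
  | zero =>
    intro l acc hl
    have : l = [] := by cases l <;> simp_all
    subst this
    rw [PySem.Chars.replace.go.eq_def]
    simp [rep]
  | succ n ih =>
    intro l acc hl
    cases l with
    | nil =>
      rw [PySem.Chars.replace.go.eq_def]
      simp [rep]
    | cons c t =>
      rw [PySem.Chars.replace.go.eq_def]
      simp only []
      by_cases hp : old.isPrefixOf (c :: t) = true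
      · rw [if_pos hp]
        have hlen : 1 ≤ old.length := by cases old <;> simp_all
        rw [ih _ _ (by simp [List.length_drop] at *; omega)]
        rw [show rep old new (c :: t) = new ++ rep old new ((c :: t).drop old.length) by
          simp [rep, hp, ho]]
        simp
      · rw [if_neg hp]
        rw [ih _ _ (by simp at hl ⊢; omega)]
        rw [rep_cons_neg _ _ _ _ (Bool.not_eq_true _ ▸ hp)]
        simp

lemma replace_eq_rep (s old new : List Char) (ho : old ≠ []) :
    PySem.Chars.replace s old new = rep old new s := by
  rw [PySem.Chars.replace]
  rw [if_neg (by simpa using ho)]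
  simpa using go_eq old new ho s.length s [] le_rfl

lemma rep_join (old new : List Char) (ho : old ≠ []) (hs : ' ' ∉ old) :
    ∀ (l : List (List Char)),
      rep old new (PySem.Chars.join [' '] l) = PySem.Chars.join [' '] (l.map (rep old new)) := by
  intro l
  induction l with
  | nil => simp [PySem.Chars.join_nil, rep]
  | cons a l ih =>
    cases l with
    | nil => simp [PySem.Chars.join_singleton]
    | cons b l =>
      rw [PySem.Chars.join_cons_cons]
      rw [show a ++ [' '] ++ PySem.Chars.join [' '] (b :: l)
          = a ++ ' ' :: PySem.Chars.join [' '] (b :: l) by simp]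
      rw [rep_append_sep old new ho hs, ih]
      simp [PySem.Chars.join_cons_cons]

lemma char_le_toNat {a b : Char} (h : a ≤ b) : a.toNat ≤ b.toNat := by
  exact Fin.mk_le_mk.mp h

lemma isupper_bounds {o : Char} (h : PySem.Chars.isupper o = true) :
    65 ≤ o.toNat ∧ o.toNat ≤ 90 := by
  simp only [PySem.Chars.isupper, Bool.and_eq_true, decide_eq_true_eq] at h
  exact ⟨char_le_toNat h.1, char_le_toNat h.2⟩

lemma noUpper_lower (t : List Char) :
    ∀ x ∈ PySem.Chars.lower t, PySem.Chars.isupper x = false := by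
  intro x hx
  simp only [PySem.Chars.lower, List.mem_map] at hx
  obtain ⟨c, -, rfl⟩ := hx
  by_contra hcon
  rw [Bool.not_eq_false] at hcon
  have hb := isupper_bounds hcon
  simp only [PySem.Chars.lowerChar] at hb hcon
  by_cases hc : PySem.Chars.isupper c = true
  · have hcb := isupper_bounds hc
    rw [if_pos hc] at hb
    have hn : (Char.ofNat (c.toNat + 32)).toNat = c.toNat + 32 := by
      have hval : (c.toNat + 32).isValidChar := by constructor; omega
      rw [Char.toNat_ofNat, if_pos hval]
    rw [hn] at hb
    omega
  · rw [if_neg hc] at hcon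
    exact hc hcon

lemma rep_noUpper (o : Char) (os new t : List Char)
    (ho : PySem.Chars.isupper o = true)
    (ht : ∀ x ∈ t, PySem.Chars.isupper x = false) :
    rep (o :: os) new t = t := by
  apply rep_of_not_mem
  intro hmem
  have := ht o hmem
  simp [ho] at this

-- the capitalized word-level fix that A's eight passes amount to (proof device only)
def fixWord (w : List Char) : List Char :=
  if PySem.Chars.startswith w ['P','v'] then ['P','V'] ++ w.drop 2
  else if PySem.Chars.startswith w ['P','h','s'] then ['P','H','S'] ++ w.drop 3
  else if PySem.Chars.startswith w ['O','c','g','t'] then ['O','C','G','T'] ++ w.drop 4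
  else if PySem.Chars.startswith w ['C','c','g','t'] then ['C','C','G','T'] ++ w.drop 4
  else if PySem.Chars.startswith w ['H','2'] then ['H','₂'] ++ w.drop 2
  else if PySem.Chars.startswith w ['C','o','2'] then ['C','O','₂'] ++ w.drop 3
  else if PySem.Chars.startswith w ['A','c'] || PySem.Chars.startswith w ['D','c'] then
    let rest := w.drop 2
    if PySem.Chars.startswith rest ['o','2'] then w.take 1 ++ ['C','O','₂'] ++ rest.drop 2
    else if PySem.Chars.startswith rest ['c','g','t'] then w.take 1 ++ ['C','C','G','T'] ++ rest.drop 3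
    else w.take 1 ++ ['C'] ++ rest
  else w

-- the eight replacement passes of A, as nested `rep`s
def R8 (s : List Char) : List Char :=
  rep ['C','o','2'] ['C','O','₂'] (rep ['H','2'] ['H','₂'] (rep ['C','c','g','t'] ['C','C','G','T']
    (rep ['O','c','g','t'] ['O','C','G','T'] (rep ['P','h','s'] ['P','H','S']
      (rep ['D','c'] ['D','C'] (rep ['A','c'] ['A','C'] (rep ['P','v'] ['P','V'] s)))))))

lemma foldl_pyReplacements (s : List Char) :
    pyReplacements.foldl (fun s p => PySem.Chars.replace s p.1 p.2) s = R8 s := by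
  simp only [pyReplacements, List.foldl_cons, List.foldl_nil]
  rw [replace_eq_rep _ _ _ (by simp), replace_eq_rep _ _ _ (by simp),
    replace_eq_rep _ _ _ (by simp), replace_eq_rep _ _ _ (by simp),
    replace_eq_rep _ _ _ (by simp), replace_eq_rep _ _ _ (by simp),
    replace_eq_rep _ _ _ (by simp), replace_eq_rep _ _ _ (by simp)]
  rfl

lemma R8_join (l : List (List Char)) :
    R8 (PySem.Chars.join [' '] l) = PySem.Chars.join [' '] (l.map R8) := by
  unfold R8
  rw [rep_join _ _ (by simp) (by decide), rep_join _ _ (by simp) (by decide),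
    rep_join _ _ (by simp) (by decide), rep_join _ _ (by simp) (by decide),
    rep_join _ _ (by simp) (by decide), rep_join _ _ (by simp) (by decide),
    rep_join _ _ (by simp) (by decide), rep_join _ _ (by simp) (by decide)]
  simp [List.map_map]
  rfl

lemma rep_nil (old new : List Char) : rep old new [] = [] := by simp [rep]

lemma R8_word (w : List Char) (ht : ∀ x ∈ w.drop 1, PySem.Chars.isupper x = false) :
    R8 w = fixWord w := by
  cases w with
  | nil =>
    simp [R8, rep_nil, fixWord, PySem.Chars.startswith, List.isPrefixOf]
  | cons c t =>
    have hr : ∀ x ∈ t, PySem.Chars.isupper x = false := by simpa using ht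
    have hsub : ∀ (s : List Char), s <:+ t → ∀ (o : Char) (os new : List Char),
        PySem.Chars.isupper o = true → rep (o :: os) new s = s :=
      fun s hs o os new ho => rep_noUpper o os new s ho (fun x hx => hr x (hs.subset hx))
    by_cases h1 : PySem.Chars.startswith (c :: t) ['P','v'] = true
    · simp only [PySem.Chars.startswith] at h1
      obtain ⟨r, hr2⟩ := List.isPrefixOf_iff_prefix.mp h1
      simp only [List.cons_append, List.nil_append] at hr2
      injection hr2 with hc htl
      subst hc; subst htl
      have hid := hsub r ⟨['v'], rfl⟩
      simp [R8, fixWord, PySem.Chars.startswith, List.isPrefixOf, rep_cons_pos, rep_cons_neg,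
        hid, PySem.Chars.isupper]
    · by_cases h2 : PySem.Chars.startswith (c :: t) ['P','h','s'] = true
      · simp only [PySem.Chars.startswith] at h2
        obtain ⟨r, hr2⟩ := List.isPrefixOf_iff_prefix.mp h2
        simp only [List.cons_append, List.nil_append] at hr2
        injection hr2 with hc htl
        subst hc; subst htl
        have hid := hsub r ⟨['h','s'], rfl⟩
        simp [R8, fixWord, PySem.Chars.startswith, List.isPrefixOf, rep_cons_pos, rep_cons_neg,
          hid, PySem.Chars.isupper]
      · by_cases h3 : PySem.Chars.startswith (c :: t) ['O','c','g','t'] = true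
        · simp only [PySem.Chars.startswith] at h3
          obtain ⟨r, hr2⟩ := List.isPrefixOf_iff_prefix.mp h3
          simp only [List.cons_append, List.nil_append] at hr2
          injection hr2 with hc htl
          subst hc; subst htl
          have hid := hsub r ⟨['c','g','t'], rfl⟩
          simp [R8, fixWord, PySem.Chars.startswith, List.isPrefixOf, rep_cons_pos, rep_cons_neg,
            hid, PySem.Chars.isupper]
        · by_cases h4 : PySem.Chars.startswith (c :: t) ['C','c','g','t'] = true
          · simp only [PySem.Chars.startswith] at h4
            obtain ⟨r, hr2⟩ := List.isPrefixOf_iff_prefix.mp h4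
            simp only [List.cons_append, List.nil_append] at hr2
            injection hr2 with hc htl
            subst hc; subst htl
            have hid := hsub r ⟨['c','g','t'], rfl⟩
            simp [R8, fixWord, PySem.Chars.startswith, List.isPrefixOf, rep_cons_pos, rep_cons_neg,
              hid, PySem.Chars.isupper]
          · by_cases h5 : PySem.Chars.startswith (c :: t) ['H','2'] = true
            · simp only [PySem.Chars.startswith] at h5
              obtain ⟨r, hr2⟩ := List.isPrefixOf_iff_prefix.mp h5
              simp only [List.cons_append, List.nil_append] at hr2
              injection hr2 with hc htl
              subst hc; subst htl
              have hid := hsub r ⟨['2'], rfl⟩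
              simp [R8, fixWord, PySem.Chars.startswith, List.isPrefixOf, rep_cons_pos, rep_cons_neg,
                hid, PySem.Chars.isupper]
            · by_cases h6 : PySem.Chars.startswith (c :: t) ['C','o','2'] = true
              · simp only [PySem.Chars.startswith] at h6
                obtain ⟨r, hr2⟩ := List.isPrefixOf_iff_prefix.mp h6
                simp only [List.cons_append, List.nil_append] at hr2
                injection hr2 with hc htl
                subst hc; subst htl
                have hid := hsub r ⟨['o','2'], rfl⟩
                simp [R8, fixWord, PySem.Chars.startswith, List.isPrefixOf, rep_cons_pos, rep_cons_neg,
                  hid, PySem.Chars.isupper]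
              · by_cases h7 : (PySem.Chars.startswith (c :: t) ['A','c']
                    || PySem.Chars.startswith (c :: t) ['D','c']) = true
                · rcases (by simpa using h7 : PySem.Chars.startswith (c :: t) ['A','c'] = true ∨ PySem.Chars.startswith (c :: t) ['D','c'] = true) with h7a | h7d
                  · simp only [PySem.Chars.startswith] at h7a
                    obtain ⟨t1, hr2⟩ := List.isPrefixOf_iff_prefix.mp h7a
                    simp only [List.cons_append, List.nil_append] at hr2
                    injection hr2 with hc htl
                    subst hc; subst htl
                    by_cases ho2 : PySem.Chars.startswith t1 ['o','2'] = true
                    · simp only [PySem.Chars.startswith] at ho2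
                      obtain ⟨r, hr3⟩ := List.isPrefixOf_iff_prefix.mp ho2
                      simp only [List.cons_append, List.nil_append] at hr3
                      subst hr3
                      have hid := hsub r ⟨['c','o','2'], rfl⟩
                      simp [R8, fixWord, PySem.Chars.startswith, List.isPrefixOf, rep_cons_pos,
                        rep_cons_neg, hid, PySem.Chars.isupper]
                    · by_cases hcgt : PySem.Chars.startswith t1 ['c','g','t'] = true
                      · simp only [PySem.Chars.startswith] at hcgt
                        obtain ⟨r, hr3⟩ := List.isPrefixOf_iff_prefix.mp hcgt
                        simp only [List.cons_append, List.nil_append] at hr3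
                        subst hr3
                        have hid := hsub r ⟨['c','c','g','t'], rfl⟩
                        simp [R8, fixWord, PySem.Chars.startswith, List.isPrefixOf, rep_cons_pos,
                          rep_cons_neg, hid, PySem.Chars.isupper]
                      · have ho2' : List.isPrefixOf ['o','2'] t1 = false := by
                          rw [Bool.eq_false_iff]
                          simpa [PySem.Chars.startswith] using ho2
                        have hcgt' : List.isPrefixOf ['c','g','t'] t1 = false := by
                          rw [Bool.eq_false_iff]
                          simpa [PySem.Chars.startswith] using hcgt
                        have hid := hsub t1 ⟨['c'], rfl⟩
                        simp [R8, fixWord, PySem.Chars.startswith, List.isPrefixOf, rep_cons_pos,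
                          rep_cons_neg, hid, ho2', hcgt', PySem.Chars.isupper]
                  · simp only [PySem.Chars.startswith] at h7d
                    obtain ⟨t1, hr2⟩ := List.isPrefixOf_iff_prefix.mp h7d
                    simp only [List.cons_append, List.nil_append] at hr2
                    injection hr2 with hc htl
                    subst hc; subst htl
                    by_cases ho2 : PySem.Chars.startswith t1 ['o','2'] = true
                    · simp only [PySem.Chars.startswith] at ho2
                      obtain ⟨r, hr3⟩ := List.isPrefixOf_iff_prefix.mp ho2
                      simp only [List.cons_append, List.nil_append] at hr3
                      subst hr3
                      have hid := hsub r ⟨['c','o','2'], rfl⟩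
                      simp [R8, fixWord, PySem.Chars.startswith, List.isPrefixOf, rep_cons_pos,
                        rep_cons_neg, hid, PySem.Chars.isupper]
                    · by_cases hcgt : PySem.Chars.startswith t1 ['c','g','t'] = true
                      · simp only [PySem.Chars.startswith] at hcgt
                        obtain ⟨r, hr3⟩ := List.isPrefixOf_iff_prefix.mp hcgt
                        simp only [List.cons_append, List.nil_append] at hr3
                        subst hr3
                        have hid := hsub r ⟨['c','c','g','t'], rfl⟩
                        simp [R8, fixWord, PySem.Chars.startswith, List.isPrefixOf, rep_cons_pos,
                          rep_cons_neg, hid, PySem.Chars.isupper]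
                      · have ho2' : List.isPrefixOf ['o','2'] t1 = false := by
                          rw [Bool.eq_false_iff]
                          simpa [PySem.Chars.startswith] using ho2
                        have hcgt' : List.isPrefixOf ['c','g','t'] t1 = false := by
                          rw [Bool.eq_false_iff]
                          simpa [PySem.Chars.startswith] using hcgt
                        have hid := hsub t1 ⟨['c'], rfl⟩
                        simp [R8, fixWord, PySem.Chars.startswith, List.isPrefixOf, rep_cons_pos,
                          rep_cons_neg, hid, ho2', hcgt', PySem.Chars.isupper]
                · have h1' : List.isPrefixOf ['P','v'] (c :: t) = false := by
                    rw [Bool.eq_false_iff]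
                    simpa [PySem.Chars.startswith] using h1
                  have h2' : List.isPrefixOf ['P','h','s'] (c :: t) = false := by
                    rw [Bool.eq_false_iff]
                    simpa [PySem.Chars.startswith] using h2
                  have h3' : List.isPrefixOf ['O','c','g','t'] (c :: t) = false := by
                    rw [Bool.eq_false_iff]
                    simpa [PySem.Chars.startswith] using h3
                  have h4' : List.isPrefixOf ['C','c','g','t'] (c :: t) = false := by
                    rw [Bool.eq_false_iff]
                    simpa [PySem.Chars.startswith] using h4
                  have h5' : List.isPrefixOf ['H','2'] (c :: t) = false := by
                    rw [Bool.eq_false_iff]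
                    simpa [PySem.Chars.startswith] using h5
                  have h6' : List.isPrefixOf ['C','o','2'] (c :: t) = false := by
                    rw [Bool.eq_false_iff]
                    simpa [PySem.Chars.startswith] using h6
                  have h7a' : List.isPrefixOf ['A','c'] (c :: t) = false := by
                    rw [Bool.eq_false_iff]
                    intro hcon
                    exact h7 (by simp [PySem.Chars.startswith, hcon])
                  have h7d' : List.isPrefixOf ['D','c'] (c :: t) = false := by
                    rw [Bool.eq_false_iff]
                    intro hcon
                    exact h7 (by simp [PySem.Chars.startswith, hcon])
                  have hid := hsub t (List.suffix_refl t)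
                  simp [R8, fixWord, PySem.Chars.startswith, rep_cons_neg, h1', h2', h3', h4',
                    h5', h6', h7a', h7d', hid, PySem.Chars.isupper]

-- ---------- B-side machinery: a generic "scan with a key table" and its laws ----------

-- the key/value table of Source B's _REPLACEMENTS, as data for the proofs
def bKeys : List (List Char × List Char) :=
  [(['P','v'], ['P','V']), (['A','c'], ['A','C']), (['D','c'], ['D','C']),
   (['P','h','s'], ['P','H','S']), (['O','c','g','t'], ['O','C','G','T']),
   (['C','c','g','t'], ['C','C','G','T']), (['H','2'], ['H','₂']),
   (['C','o','2'], ['C','O','₂'])]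

def grep (ks : List (List Char × List Char)) : List Char → List Char
  | [] => []
  | c :: t =>
    match ks.find? (fun p => p.1.isPrefixOf (c :: t)) with
    | some p => p.2 ++ grep ks ((c :: t).drop (max 1 p.1.length))
    | none => c :: grep ks t
termination_by s => s.length
decreasing_by
  · simp only [List.length_drop, List.length_cons]
    omega
  · simp

lemma grep_nil (ks : List (List Char × List Char)) : grep ks [] = [] := by rw [grep]

lemma grep_cons (ks : List (List Char × List Char)) (c : Char) (t : List Char) :
    grep ks (c :: t) = (match ks.find? (fun p => p.1.isPrefixOf (c :: t)) with
      | some p => p.2 ++ grep ks ((c :: t).drop (max 1 p.1.length))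
      | none => c :: grep ks t) := by rw [grep]

lemma grep_cons_none (ks : List (List Char × List Char)) (c : Char) (t : List Char)
    (h : ks.find? (fun p => p.1.isPrefixOf (c :: t)) = none) :
    grep ks (c :: t) = c :: grep ks t := by rw [grep_cons, h]

lemma grep_cons_some (ks : List (List Char × List Char)) (c : Char) (t : List Char)
    (p : List Char × List Char)
    (h : ks.find? (fun q => q.1.isPrefixOf (c :: t)) = some p) :
    grep ks (c :: t) = p.2 ++ grep ks ((c :: t).drop (max 1 p.1.length)) := by rw [grep_cons, h]

lemma find?_congr {α : Type} (p q : α → Bool) :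
    ∀ (l : List α), (∀ a ∈ l, p a = q a) → l.find? p = l.find? q := by
  intro l
  induction l with
  | nil => intro _; rfl
  | cons a l ih =>
    intro h
    have ha := h a (List.mem_cons_self ..)
    by_cases hp : p a = true
    · rw [List.find?_cons_of_pos hp, List.find?_cons_of_pos (ha ▸ hp)]
    · rw [Bool.not_eq_true] at hp
      rw [List.find?_cons_of_neg (by simp [hp]), List.find?_cons_of_neg (by simp [ha ▸ hp]),
        ih (fun a ha => h a (List.mem_cons_of_mem _ ha))]

lemma bScan_eq_grep : ∀ (s : List Char), bScan s = grep bKeys s := by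
  intro s
  induction s using bScan.induct with
  | case1 => rw [bScan.eq_1, grep_nil]
  | case2 c t h1 ih =>
    have hf : bKeys.find? (fun p => p.1.isPrefixOf (c :: t)) = some (['P','v'],['P','V']) := by
      simp only [bKeys]
      rw [List.find?_cons_of_pos (by simpa using h1)]
    rw [grep_cons_some _ _ _ _ hf]
    simp only [bScan]
    simp [h1]
    simpa using ih
  | case3 c t h1 h2 ih =>
    have hf : bKeys.find? (fun p => p.1.isPrefixOf (c :: t)) = some (['A','c'],['A','C']) := by
      simp only [bKeys]
      rw [List.find?_cons_of_neg (by simpa using h1),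
        List.find?_cons_of_pos (by simpa using h2)]
    rw [grep_cons_some _ _ _ _ hf]
    simp only [bScan]
    simp [h1, h2]
    simpa using ih
  | case4 c t h1 h2 h3 ih =>
    have hf : bKeys.find? (fun p => p.1.isPrefixOf (c :: t)) = some (['D','c'],['D','C']) := by
      simp only [bKeys]
      rw [List.find?_cons_of_neg (by simpa using h1),
        List.find?_cons_of_neg (by simpa using h2),
        List.find?_cons_of_pos (by simpa using h3)]
    rw [grep_cons_some _ _ _ _ hf]
    simp only [bScan]
    simp [h1, h2, h3]
    simpa using ih
  | case5 c t h1 h2 h3 h4 ih =>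
    have hf : bKeys.find? (fun p => p.1.isPrefixOf (c :: t)) = some (['P','h','s'],['P','H','S']) := by
      simp only [bKeys]
      rw [List.find?_cons_of_neg (by simpa using h1),
        List.find?_cons_of_neg (by simpa using h2),
        List.find?_cons_of_neg (by simpa using h3),
        List.find?_cons_of_pos (by simpa using h4)]
    rw [grep_cons_some _ _ _ _ hf]
    simp only [bScan]
    simp [h1, h2, h3, h4]
    simpa using ih
  | case6 c t h1 h2 h3 h4 h5 ih =>
    have hf : bKeys.find? (fun p => p.1.isPrefixOf (c :: t)) = some (['O','c','g','t'],['O','C','G','T']) := by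
      simp only [bKeys]
      rw [List.find?_cons_of_neg (by simpa using h1),
        List.find?_cons_of_neg (by simpa using h2),
        List.find?_cons_of_neg (by simpa using h3),
        List.find?_cons_of_neg (by simpa using h4),
        List.find?_cons_of_pos (by simpa using h5)]
    rw [grep_cons_some _ _ _ _ hf]
    simp only [bScan]
    simp [h1, h2, h3, h4, h5]
    simpa using ih
  | case7 c t h1 h2 h3 h4 h5 h6 ih =>
    have hf : bKeys.find? (fun p => p.1.isPrefixOf (c :: t)) = some (['C','c','g','t'],['C','C','G','T']) := by
      simp only [bKeys]
      rw [List.find?_cons_of_neg (by simpa using h1),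
        List.find?_cons_of_neg (by simpa using h2),
        List.find?_cons_of_neg (by simpa using h3),
        List.find?_cons_of_neg (by simpa using h4),
        List.find?_cons_of_neg (by simpa using h5),
        List.find?_cons_of_pos (by simpa using h6)]
    rw [grep_cons_some _ _ _ _ hf]
    simp only [bScan]
    simp [h1, h2, h3, h4, h5, h6]
    simpa using ih
  | case8 c t h1 h2 h3 h4 h5 h6 h7 ih =>
    have hf : bKeys.find? (fun p => p.1.isPrefixOf (c :: t)) = some (['H','2'],['H','₂']) := by
      simp only [bKeys]
      rw [List.find?_cons_of_neg (by simpa using h1),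
        List.find?_cons_of_neg (by simpa using h2),
        List.find?_cons_of_neg (by simpa using h3),
        List.find?_cons_of_neg (by simpa using h4),
        List.find?_cons_of_neg (by simpa using h5),
        List.find?_cons_of_neg (by simpa using h6),
        List.find?_cons_of_pos (by simpa using h7)]
    rw [grep_cons_some _ _ _ _ hf]
    simp only [bScan]
    simp [h1, h2, h3, h4, h5, h6, h7]
    simpa using ih
  | case9 c t h1 h2 h3 h4 h5 h6 h7 h8 ih =>
    have hf : bKeys.find? (fun p => p.1.isPrefixOf (c :: t)) = some (['C','o','2'],['C','O','₂']) := by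
      simp only [bKeys]
      rw [List.find?_cons_of_neg (by simpa using h1),
        List.find?_cons_of_neg (by simpa using h2),
        List.find?_cons_of_neg (by simpa using h3),
        List.find?_cons_of_neg (by simpa using h4),
        List.find?_cons_of_neg (by simpa using h5),
        List.find?_cons_of_neg (by simpa using h6),
        List.find?_cons_of_neg (by simpa using h7),
        List.find?_cons_of_pos (by simpa using h8)]
    rw [grep_cons_some _ _ _ _ hf]
    simp only [bScan]
    simp [h1, h2, h3, h4, h5, h6, h7, h8]
    simpa using ih
  | case10 c t h1 h2 h3 h4 h5 h6 h7 h8 ih =>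
    have hf : bKeys.find? (fun p => p.1.isPrefixOf (c :: t)) = none := by
      simp only [bKeys]
      rw [List.find?_cons_of_neg (by simpa using h1),
        List.find?_cons_of_neg (by simpa using h2),
        List.find?_cons_of_neg (by simpa using h3),
        List.find?_cons_of_neg (by simpa using h4),
        List.find?_cons_of_neg (by simpa using h5),
        List.find?_cons_of_neg (by simpa using h6),
        List.find?_cons_of_neg (by simpa using h7),
        List.find?_cons_of_neg (by simpa using h8)]
      rfl
    rw [grep_cons_none _ _ _ hf]
    simp only [bScan]
    simp [h1, h2, h3, h4, h5, h6, h7, h8]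
    simpa using ih

lemma grep_append_sep (ks : List (List Char × List Char))
    (hk : ∀ p ∈ ks, p.1 ≠ [] ∧ ' ' ∉ p.1) :
    ∀ (a b : List Char), grep ks (a ++ ' ' :: b) = grep ks a ++ ' ' :: grep ks b := by
  have hsepNone : ∀ (b : List Char),
      ks.find? (fun p => p.1.isPrefixOf (' ' :: b)) = none := by
    intro b
    rw [List.find?_eq_none]
    intro p hp
    have hgood := hk p hp
    rw [show (' ' :: b : List Char) = [] ++ ' ' :: b by simp,
      isPrefixOf_append_sep _ _ _ hgood.2]
    cases hh : p.1 with
    | nil => exact absurd hh hgood.1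
    | cons k0 kr => simp [List.isPrefixOf]
  suffices H : ∀ (n : Nat) (a : List Char), a.length ≤ n → ∀ b,
      grep ks (a ++ ' ' :: b) = grep ks a ++ ' ' :: grep ks b by
    intro a b; exact H a.length a le_rfl b
  intro n
  induction n with
  | zero =>
    intro a ha b
    have : a = [] := by cases a <;> simp_all
    subst this
    simp only [List.nil_append]
    rw [grep_cons_none _ _ _ (hsepNone b), grep_nil]
    simp
  | succ n ih =>
    intro a ha b
    cases a with
    | nil =>
      simp only [List.nil_append]
      rw [grep_cons_none _ _ _ (hsepNone b), grep_nil]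
      simp
    | cons c t =>
      have hfind : ks.find? (fun p => p.1.isPrefixOf (c :: (t ++ ' ' :: b)))
          = ks.find? (fun p => p.1.isPrefixOf (c :: t)) := by
        apply find?_congr
        intro p hp
        rw [show c :: (t ++ ' ' :: b) = (c :: t) ++ ' ' :: b by simp]
        exact isPrefixOf_append_sep _ _ _ (hk p hp).2
      rw [show (c :: t) ++ ' ' :: b = c :: (t ++ ' ' :: b) by simp]
      cases hf : ks.find? (fun p => p.1.isPrefixOf (c :: t)) with
      | none =>
        rw [grep_cons_none _ _ _ (hfind.trans hf), grep_cons_none _ _ _ hf]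
        rw [ih t (by simp at ha; omega) b]
        simp
      | some p =>
        have hmem := List.mem_of_find?_eq_some hf
        have hpre : p.1.isPrefixOf (c :: t) = true := by
          have := List.find?_some hf
          simpa using this
        have hne := (hk p hmem).1
        have hlen1 : 1 ≤ p.1.length := by
          cases hh : p.1 with
          | nil => exact absurd hh hne
          | cons _ _ => simp

        have hma : max 1 p.1.length = p.1.length := by omega
        have hlea : p.1.length ≤ (c :: t).length :=
          by simpa using List.IsPrefix.length_le (List.isPrefixOf_iff_prefix.mp hpre)
        rw [grep_cons_some _ _ _ _ (hfind.trans hf), grep_cons_some _ _ _ _ hf, hma]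
        rw [show c :: (t ++ ' ' :: b) = (c :: t) ++ ' ' :: b by simp,
          List.drop_append_of_le_length hlea]
        rw [ih ((c :: t).drop p.1.length)
          (by simp only [List.length_drop, List.length_cons]; simp at ha; omega) b]
        simp

lemma grep_join (ks : List (List Char × List Char))
    (hk : ∀ p ∈ ks, p.1 ≠ [] ∧ ' ' ∉ p.1) :
    ∀ (l : List (List Char)),
      grep ks (PySem.Chars.join [' '] l) = PySem.Chars.join [' '] (l.map (grep ks)) := by
  intro l
  induction l with
  | nil => simp [PySem.Chars.join_nil, grep_nil]
  | cons a l ih =>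
    cases l with
    | nil => simp [PySem.Chars.join_singleton]
    | cons b l =>
      rw [PySem.Chars.join_cons_cons]
      rw [show a ++ [' '] ++ PySem.Chars.join [' '] (b :: l)
          = a ++ ' ' :: PySem.Chars.join [' '] (b :: l) by simp]
      rw [grep_append_sep ks hk, ih]
      simp [PySem.Chars.join_cons_cons]

lemma grep_no_upper (ks : List (List Char × List Char))
    (hk : ∀ p ∈ ks, ∃ k0 kr, p.1 = k0 :: kr ∧ PySem.Chars.isupper k0 = true) :
    ∀ (s : List Char), (∀ x ∈ s, PySem.Chars.isupper x = false) → grep ks s = s := by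
  intro s
  induction s with
  | nil => intro _; rw [grep_nil]
  | cons c t ih =>
    intro h
    have hc := h c (List.mem_cons_self ..)
    have hnone : ks.find? (fun p => p.1.isPrefixOf (c :: t)) = none := by
      rw [List.find?_eq_none]
      intro p hp
      obtain ⟨k0, kr, hpk, hup⟩ := hk p hp
      rw [hpk]
      simp only [List.isPrefixOf, Bool.and_eq_true, not_and, beq_iff_eq]
      intro hk0
      subst hk0
      simp [hup] at hc
    rw [grep_cons_none _ _ _ hnone]
    rw [ih (fun x hx => h x (List.mem_cons_of_mem _ hx))]

-- capCascade: the cascade condition read off the capitalized word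
def capCascade : List Char → Bool
  | [] => false
  | c :: t =>
    (c == 'A' || c == 'D') &&
    (List.isPrefixOf ['c','o','2'] t || List.isPrefixOf ['c','c','g','t'] t)

lemma bKeys_good : ∀ p ∈ bKeys, p.1 ≠ [] ∧ ' ' ∉ p.1 := by decide

lemma bKeys_upper : ∀ p ∈ bKeys,
    ∃ k0 kr, p.1 = k0 :: kr ∧ PySem.Chars.isupper k0 = true := by
  intro p hp
  fin_cases hp <;> exact ⟨_, _, rfl, by decide⟩

-- On a capitalized word (tail contains no uppercase) that is not a cascade word,
-- the one-pass scan equals A's word-level fix.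
lemma grep_word (c : Char) (t : List Char)
    (hr : ∀ x ∈ t, PySem.Chars.isupper x = false)
    (hnc : capCascade (c :: t) = false) :
    grep bKeys (c :: t) = fixWord (c :: t) := by
  have hid : ∀ (s : List Char), s <:+ t → grep bKeys s = s :=
    fun s hs => grep_no_upper bKeys bKeys_upper s
      (fun x hx => hr x (hs.subset hx))
  by_cases h1 : List.isPrefixOf ['P','v'] (c :: t) = true
  · obtain ⟨r, hr2⟩ := List.isPrefixOf_iff_prefix.mp h1
    simp only [List.cons_append, List.nil_append] at hr2
    injection hr2 with hc htl
    subst hc; subst htl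
    have hidr := hid r ⟨['v'], rfl⟩
    have hf : bKeys.find? (fun p => p.1.isPrefixOf ('P'::'v'::r)) = some (['P','v'],['P','V']) := by
      simp [bKeys, List.isPrefixOf]
    rw [grep_cons_some _ _ _ _ hf]
    simp [fixWord, PySem.Chars.startswith, List.isPrefixOf, hidr]
  · by_cases h2 : List.isPrefixOf ['P','h','s'] (c :: t) = true
    · obtain ⟨r, hr2⟩ := List.isPrefixOf_iff_prefix.mp h2
      simp only [List.cons_append, List.nil_append] at hr2
      injection hr2 with hc htl
      subst hc; subst htl
      have hidr := hid r ⟨['h','s'], rfl⟩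
      have hf : bKeys.find? (fun p => p.1.isPrefixOf ('P'::'h'::'s'::r)) = some (['P','h','s'],['P','H','S']) := by
        simp [bKeys, List.isPrefixOf]
      rw [grep_cons_some _ _ _ _ hf]
      simp [fixWord, PySem.Chars.startswith, List.isPrefixOf, hidr]
    · by_cases h3 : List.isPrefixOf ['O','c','g','t'] (c :: t) = true
      · obtain ⟨r, hr2⟩ := List.isPrefixOf_iff_prefix.mp h3
        simp only [List.cons_append, List.nil_append] at hr2
        injection hr2 with hc htl
        subst hc; subst htl
        have hidr := hid r ⟨['c','g','t'], rfl⟩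
        have hf : bKeys.find? (fun p => p.1.isPrefixOf ('O'::'c'::'g'::'t'::r)) = some (['O','c','g','t'],['O','C','G','T']) := by
          simp [bKeys, List.isPrefixOf]
        rw [grep_cons_some _ _ _ _ hf]
        simp [fixWord, PySem.Chars.startswith, List.isPrefixOf, hidr]
      · by_cases h4 : List.isPrefixOf ['C','c','g','t'] (c :: t) = true
        · obtain ⟨r, hr2⟩ := List.isPrefixOf_iff_prefix.mp h4
          simp only [List.cons_append, List.nil_append] at hr2
          injection hr2 with hc htl
          subst hc; subst htl
          have hidr := hid r ⟨['c','g','t'], rfl⟩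
          have hf : bKeys.find? (fun p => p.1.isPrefixOf ('C'::'c'::'g'::'t'::r)) = some (['C','c','g','t'],['C','C','G','T']) := by
            simp [bKeys, List.isPrefixOf]
          rw [grep_cons_some _ _ _ _ hf]
          simp [fixWord, PySem.Chars.startswith, List.isPrefixOf, hidr]
        · by_cases h5 : List.isPrefixOf ['H','2'] (c :: t) = true
          · obtain ⟨r, hr2⟩ := List.isPrefixOf_iff_prefix.mp h5
            simp only [List.cons_append, List.nil_append] at hr2
            injection hr2 with hc htl
            subst hc; subst htl
            have hidr := hid r ⟨['2'], rfl⟩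
            have hf : bKeys.find? (fun p => p.1.isPrefixOf ('H'::'2'::r)) = some (['H','2'],['H','₂']) := by
              simp [bKeys, List.isPrefixOf]
            rw [grep_cons_some _ _ _ _ hf]
            simp [fixWord, PySem.Chars.startswith, List.isPrefixOf, hidr]
          · by_cases h6 : List.isPrefixOf ['C','o','2'] (c :: t) = true
            · obtain ⟨r, hr2⟩ := List.isPrefixOf_iff_prefix.mp h6
              simp only [List.cons_append, List.nil_append] at hr2
              injection hr2 with hc htl
              subst hc; subst htl
              have hidr := hid r ⟨['o','2'], rfl⟩
              have hf : bKeys.find? (fun p => p.1.isPrefixOf ('C'::'o'::'2'::r)) = some (['C','o','2'],['C','O','₂']) := by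
                simp [bKeys, List.isPrefixOf]
              rw [grep_cons_some _ _ _ _ hf]
              simp [fixWord, PySem.Chars.startswith, List.isPrefixOf, hidr]
            · by_cases h7a : List.isPrefixOf ['A','c'] (c :: t) = true
              · obtain ⟨r, hr2⟩ := List.isPrefixOf_iff_prefix.mp h7a
                simp only [List.cons_append, List.nil_append] at hr2
                injection hr2 with hc htl
                subst hc; subst htl
                have hidr := hid r ⟨['c'], rfl⟩
                have hno2 : List.isPrefixOf ['o','2'] r = false := by
                  by_contra hcon
                  rw [Bool.not_eq_false] at hcon
                  simp [capCascade, List.isPrefixOf, hcon] at hnc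
                have hncgt : List.isPrefixOf ['c','g','t'] r = false := by
                  by_contra hcon
                  rw [Bool.not_eq_false] at hcon
                  simp [capCascade, List.isPrefixOf, hcon] at hnc
                have hf : bKeys.find? (fun p => p.1.isPrefixOf ('A'::'c'::r)) = some (['A','c'],['A','C']) := by
                  simp [bKeys, List.isPrefixOf]
                rw [grep_cons_some _ _ _ _ hf]
                simp [fixWord, PySem.Chars.startswith, List.isPrefixOf, hidr, hno2, hncgt]
              · by_cases h7d : List.isPrefixOf ['D','c'] (c :: t) = true
                · obtain ⟨r, hr2⟩ := List.isPrefixOf_iff_prefix.mp h7d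
                  simp only [List.cons_append, List.nil_append] at hr2
                  injection hr2 with hc htl
                  subst hc; subst htl
                  have hidr := hid r ⟨['c'], rfl⟩
                  have hno2 : List.isPrefixOf ['o','2'] r = false := by
                    by_contra hcon
                    rw [Bool.not_eq_false] at hcon
                    simp [capCascade, List.isPrefixOf, hcon] at hnc
                  have hncgt : List.isPrefixOf ['c','g','t'] r = false := by
                    by_contra hcon
                    rw [Bool.not_eq_false] at hcon
                    simp [capCascade, List.isPrefixOf, hcon] at hnc
                  have hf : bKeys.find? (fun p => p.1.isPrefixOf ('D'::'c'::r)) = some (['D','c'],['D','C']) := by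
                    simp [bKeys, List.isPrefixOf]
                  rw [grep_cons_some _ _ _ _ hf]
                  simp [fixWord, PySem.Chars.startswith, List.isPrefixOf, hidr, hno2, hncgt]
                · have h1' := Bool.not_eq_true _ ▸ h1
                  have h2' := Bool.not_eq_true _ ▸ h2
                  have h3' := Bool.not_eq_true _ ▸ h3
                  have h4' := Bool.not_eq_true _ ▸ h4
                  have h5' := Bool.not_eq_true _ ▸ h5
                  have h6' := Bool.not_eq_true _ ▸ h6
                  have h7a' := Bool.not_eq_true _ ▸ h7a
                  have h7d' := Bool.not_eq_true _ ▸ h7d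
                  have hidt := hid t (List.suffix_refl t)
                  have hf : bKeys.find? (fun p => p.1.isPrefixOf (c :: t)) = none := by
                    simp [bKeys, h1', h2', h3', h4', h5', h6', h7a', h7d']
                  rw [grep_cons_none _ _ _ hf]
                  rw [show (c :: grep bKeys t) = c :: t by rw [hidt]]
                  simp [fixWord, PySem.Chars.startswith, h1', h2', h3', h4', h5', h6', h7a', h7d']

-- bridge: a non-cascade raw word capitalizes to a non-cascade word
lemma upperChar_AD {c : Char}
    (h : (PySem.Chars.upperChar c == 'A' || PySem.Chars.upperChar c == 'D') = true) :
    (c == 'a' || c == 'A' || c == 'd' || c == 'D') = true := by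
  simp only [PySem.Chars.upperChar] at h
  by_cases hl : PySem.Chars.islower c = true
  · rw [if_pos hl] at h
    simp only [PySem.Chars.islower, Bool.and_eq_true, decide_eq_true_eq] at hl
    have hlb : 97 ≤ c.toNat ∧ c.toNat ≤ 122 := ⟨char_le_toNat hl.1, char_le_toNat hl.2⟩
    have hval : (c.toNat - 32).isValidChar := by constructor; omega
    have htn : (Char.ofNat (c.toNat - 32)).toNat = c.toNat - 32 := by
      rw [Char.toNat_ofNat, if_pos hval]
    simp only [Bool.or_eq_true, beq_iff_eq] at h
    rcases h with h | h
    · have h97 : c.toNat = 97 := by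
        have hh := congrArg Char.toNat h
        rw [htn] at hh
        have : (65 : Nat) = 'A'.toNat := by decide
        omega
      have : c = 'a' := by
        apply Char.ext
        apply UInt32.toNat_inj.mp
        exact h97
      simp [this]
    · have h100 : c.toNat = 100 := by
        have hh := congrArg Char.toNat h
        rw [htn] at hh
        have : (68 : Nat) = 'D'.toNat := by decide
        omega
      have : c = 'd' := by
        apply Char.ext
        apply UInt32.toNat_inj.mp
        exact h100
      simp [this]
  · rw [if_neg hl] at h
    simp only [Bool.or_eq_true, beq_iff_eq] at h
    rcases h with h | h <;> simp [h]

lemma capCascade_of_cap (w : List Char) (h : cascadeWord w = false) :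
    capCascade (pyCapitalize w) = false := by
  cases w with
  | nil => rfl
  | cons c t =>
    simp only [pyCapitalize, capCascade, cascadeWord] at h ⊢
    by_cases hAD : (PySem.Chars.upperChar c == 'A' || PySem.Chars.upperChar c == 'D') = true
    · have := upperChar_AD hAD
      rw [hAD]
      simp only [this, Bool.true_and] at h
      simpa using h
    · rw [Bool.not_eq_true] at hAD
      rw [hAD]
      simp


-- ---------- tightness: A and B differ EVERYWHERE inside D ----------

lemma islower_bounds {o : Char} (h : PySem.Chars.islower o = true) :
    97 ≤ o.toNat ∧ o.toNat ≤ 122 := by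
  simp only [PySem.Chars.islower, Bool.and_eq_true, decide_eq_true_eq] at h
  exact ⟨char_le_toNat h.1, char_le_toNat h.2⟩

lemma upperChar_not_space {c : Char} (h : PySem.Chars.isspace c = false) :
    PySem.Chars.upperChar c ≠ ' ' := by
  intro hcon
  simp only [PySem.Chars.upperChar] at hcon
  by_cases hl : PySem.Chars.islower c = true
  · rw [if_pos hl] at hcon
    have hb := islower_bounds hl
    have hval : (c.toNat - 32).isValidChar := by constructor; omega
    have := congrArg Char.toNat hcon
    rw [Char.toNat_ofNat, if_pos hval] at this
    have h32 : ' '.toNat = 32 := by decide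
    omega
  · rw [if_neg hl] at hcon
    subst hcon
    simp [PySem.Chars.isspace] at h

lemma lowerChar_not_space {c : Char} (h : PySem.Chars.isspace c = false) :
    PySem.Chars.lowerChar c ≠ ' ' := by
  intro hcon
  simp only [PySem.Chars.lowerChar] at hcon
  by_cases hu : PySem.Chars.isupper c = true
  · rw [if_pos hu] at hcon
    have hb := isupper_bounds hu
    have hval : (c.toNat + 32).isValidChar := by constructor; omega
    have := congrArg Char.toNat hcon
    rw [Char.toNat_ofNat, if_pos hval] at this
    have h32 : ' '.toNat = 32 := by decide
    omega
  · rw [if_neg hu] at hcon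
    subst hcon
    simp [PySem.Chars.isspace] at h

lemma cap_no_space {w : List Char} (h : ∀ x ∈ w, PySem.Chars.isspace x = false) :
    ' ' ∉ pyCapitalize w := by
  cases w with
  | nil => simp [pyCapitalize]
  | cons c t =>
    simp only [pyCapitalize, List.mem_cons, not_or]
    constructor
    · intro hcon
      exact upperChar_not_space (h c (List.mem_cons_self ..)) hcon.symm
    · intro hcon
      simp only [PySem.Chars.lower, List.mem_map] at hcon
      obtain ⟨x, hx, hlx⟩ := hcon
      exact lowerChar_not_space (h x (List.mem_cons_of_mem _ hx)) hlx

lemma cap_ne_nil {w : List Char} (h : w ≠ []) : pyCapitalize w ≠ [] := by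
  cases w with
  | nil => exact absurd rfl h
  | cons c t => simp [pyCapitalize]

lemma split₀_go_inv :
    ∀ (s cur : List Char) (acc : List (List Char)),
      (∀ x ∈ cur, PySem.Chars.isspace x = false) →
      (∀ w ∈ acc, (∀ x ∈ w, PySem.Chars.isspace x = false) ∧ w ≠ []) →
      ∀ w ∈ PySem.Chars.split₀.go s cur acc,
        (∀ x ∈ w, PySem.Chars.isspace x = false) ∧ w ≠ [] := by
  intro s
  induction s with
  | nil =>
    intro cur acc hcur hacc w hw
    rw [PySem.Chars.split₀.go] at hw
    by_cases hce : cur.isEmpty = true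
    · rw [if_pos hce] at hw
      exact hacc w (List.mem_reverse.mp hw)
    · rw [if_neg hce] at hw
      rw [List.mem_reverse] at hw
      rcases List.mem_cons.mp hw with hw | hw
      · subst hw
        refine ⟨fun x hx => hcur x (List.mem_reverse.mp hx), ?_⟩
        simp only [List.isEmpty_iff] at hce
        simp [hce]
      · exact hacc w hw
  | cons c rest ih =>
    intro cur acc hcur hacc w hw
    rw [PySem.Chars.split₀.go] at hw
    by_cases hsp : PySem.Chars.isspace c = true
    · rw [if_pos hsp] at hw
      by_cases hce : cur.isEmpty = true
      · rw [if_pos hce] at hw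
        exact ih [] acc (by simp) hacc w hw
      · rw [if_neg hce] at hw
        refine ih [] (cur.reverse :: acc) (by simp) ?_ w hw
        intro v hv
        rcases List.mem_cons.mp hv with hv | hv
        · subst hv
          refine ⟨fun x hx => hcur x (List.mem_reverse.mp hx), ?_⟩
          simp only [List.isEmpty_iff] at hce
          simp [hce]
        · exact hacc v hv
    · rw [if_neg hsp] at hw
      refine ih (c :: cur) acc ?_ hacc w hw
      intro x hx
      rcases List.mem_cons.mp hx with hx | hx
      · subst hx; exact Bool.not_eq_true _ ▸ hsp
      · exact hcur x hx

lemma split₀_words (s : List Char) :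
    ∀ w ∈ PySem.Chars.split₀ s,
      (∀ x ∈ w, PySem.Chars.isspace x = false) ∧ w ≠ [] := by
  intro w hw
  exact split₀_go_inv s [] [] (by simp) (by simp) w hw

lemma rep_no_space (old new : List Char) (ho : old ≠ []) (hn : ' ' ∉ new) :
    ∀ (s : List Char), ' ' ∉ s → ' ' ∉ rep old new s := by
  suffices H : ∀ (n : Nat) (s : List Char), s.length ≤ n → ' ' ∉ s → ' ' ∉ rep old new s by
    intro s; exact H s.length s le_rfl
  intro n
  induction n with
  | zero =>
    intro s hl hs
    have : s = [] := by cases s <;> simp_all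
    subst this
    simp [rep]
  | succ n ih =>
    intro s hl hs
    cases s with
    | nil => simp [rep]
    | cons c t =>
      have hlen1 : 1 ≤ old.length := by cases old <;> simp_all
      by_cases hp : old.isPrefixOf (c :: t) = true
      · rw [rep_cons_pos _ _ _ _ hp ho]
        intro hcon
        rcases List.mem_append.mp hcon with hcon | hcon
        · exact hn hcon
        · have hdropsub : (c :: t).drop old.length ⊆ c :: t := List.drop_subset _ _
          have : ' ' ∉ (c :: t).drop old.length := fun hm => hs (hdropsub hm)
          exact this (by
            have hlt : ((c :: t).drop old.length).length ≤ n := by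
              simp only [List.length_drop, List.length_cons]
              simp at hl
              omega
            exact absurd hcon (ih _ hlt (fun hm => hs (hdropsub hm))))
      · rw [rep_cons_neg _ _ _ _ (Bool.not_eq_true _ ▸ hp)]
        intro hcon
        rcases List.mem_cons.mp hcon with hcon | hcon
        · exact hs (hcon ▸ List.mem_cons_self ..)
        · exact absurd hcon (ih t (by simp at hl; omega)
            (fun hm => hs (List.mem_cons_of_mem _ hm)))

lemma rep_ne_nil (old new : List Char) (ho : old ≠ []) (hn : new ≠ [])
    (s : List Char) (hs : s ≠ []) : rep old new s ≠ [] := by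
  cases s with
  | nil => exact absurd rfl hs
  | cons c t =>
    by_cases hp : old.isPrefixOf (c :: t) = true
    · rw [rep_cons_pos _ _ _ _ hp ho]
      simp [hn]
    · rw [rep_cons_neg _ _ _ _ (Bool.not_eq_true _ ▸ hp)]
      simp

lemma R8_no_space (s : List Char) (hs : ' ' ∉ s) : ' ' ∉ R8 s := by
  unfold R8
  apply rep_no_space _ _ (by simp) (by decide)
  apply rep_no_space _ _ (by simp) (by decide)
  apply rep_no_space _ _ (by simp) (by decide)
  apply rep_no_space _ _ (by simp) (by decide)
  apply rep_no_space _ _ (by simp) (by decide)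
  apply rep_no_space _ _ (by simp) (by decide)
  apply rep_no_space _ _ (by simp) (by decide)
  exact rep_no_space _ _ (by simp) (by decide) s hs

lemma R8_ne_nil (s : List Char) (hs : s ≠ []) : R8 s ≠ [] := by
  unfold R8
  apply rep_ne_nil _ _ (by simp) (by simp)
  apply rep_ne_nil _ _ (by simp) (by simp)
  apply rep_ne_nil _ _ (by simp) (by simp)
  apply rep_ne_nil _ _ (by simp) (by simp)
  apply rep_ne_nil _ _ (by simp) (by simp)
  apply rep_ne_nil _ _ (by simp) (by simp)
  apply rep_ne_nil _ _ (by simp) (by simp)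
  exact rep_ne_nil _ _ (by simp) (by simp) s hs

lemma grep_no_space (ks : List (List Char × List Char))
    (hv : ∀ p ∈ ks, ' ' ∉ p.2) :
    ∀ (s : List Char), ' ' ∉ s → ' ' ∉ grep ks s := by
  suffices H : ∀ (n : Nat) (s : List Char), s.length ≤ n → ' ' ∉ s → ' ' ∉ grep ks s by
    intro s; exact H s.length s le_rfl
  intro n
  induction n with
  | zero =>
    intro s hl hs
    have : s = [] := by cases s <;> simp_all
    subst this
    simp [grep_nil]
  | succ n ih =>
    intro s hl hs
    cases s with
    | nil => simp [grep_nil]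
    | cons c t =>
      cases hf : ks.find? (fun p => p.1.isPrefixOf (c :: t)) with
      | none =>
        rw [grep_cons_none _ _ _ hf]
        intro hcon
        rcases List.mem_cons.mp hcon with hcon | hcon
        · exact hs (hcon ▸ List.mem_cons_self ..)
        · exact absurd hcon (ih t (by simp at hl; omega)
            (fun hm => hs (List.mem_cons_of_mem _ hm)))
      | some p =>
        rw [grep_cons_some _ _ _ _ hf]
        intro hcon
        rcases List.mem_append.mp hcon with hcon | hcon
        · exact hv p (List.mem_of_find?_eq_some hf) hcon
        · have hdropsub : (c :: t).drop (max 1 p.1.length) ⊆ c :: t := List.drop_subset _ _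
          refine absurd hcon (ih _ ?_ (fun hm => hs (hdropsub hm)))
          simp only [List.length_drop, List.length_cons]
          simp at hl
          omega

lemma grep_ne_nil (ks : List (List Char × List Char))
    (hv : ∀ p ∈ ks, p.2 ≠ []) (s : List Char) (hs : s ≠ []) : grep ks s ≠ [] := by
  cases s with
  | nil => exact absurd rfl hs
  | cons c t =>
    cases hf : ks.find? (fun p => p.1.isPrefixOf (c :: t)) with
    | none => rw [grep_cons_none _ _ _ hf]; simp
    | some p =>
      rw [grep_cons_some _ _ _ _ hf]
      simp [hv p (List.mem_of_find?_eq_some hf)]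

lemma append_sep_inj :
    ∀ (a1 a2 x y : List Char), ' ' ∉ a1 → ' ' ∉ a2 →
      a1 ++ ' ' :: x = a2 ++ ' ' :: y → a1 = a2 ∧ x = y := by
  intro a1
  induction a1 with
  | nil =>
    intro a2 x y _ h2 heq
    cases a2 with
    | nil => simpa using heq
    | cons b bs =>
      simp only [List.nil_append, List.cons_append, List.cons.injEq] at heq
      exact absurd (heq.1 ▸ List.mem_cons_self ..) h2
  | cons a as ih =>
    intro a2 x y h1 h2 heq
    cases a2 with
    | nil =>
      simp only [List.nil_append, List.cons_append, List.cons.injEq] at heq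
      exact absurd (heq.1 ▸ List.mem_cons_self ..) h1
    | cons b bs =>
      simp only [List.cons_append, List.cons.injEq] at heq
      obtain ⟨hab, hrest⟩ := heq
      have := ih bs x y (fun hm => h1 (List.mem_cons_of_mem _ hm))
        (fun hm => h2 (List.mem_cons_of_mem _ hm)) hrest
      exact ⟨by rw [hab, this.1], this.2⟩

lemma join_inj :
    ∀ (l1 l2 : List (List Char)),
      (∀ w ∈ l1, ' ' ∉ w ∧ w ≠ []) → (∀ w ∈ l2, ' ' ∉ w ∧ w ≠ []) →
      PySem.Chars.join [' '] l1 = PySem.Chars.join [' '] l2 → l1 = l2 := by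
  intro l1
  induction l1 with
  | nil =>
    intro l2 _ h2 heq
    cases l2 with
    | nil => rfl
    | cons a l2 =>
      cases l2 with
      | nil =>
        rw [PySem.Chars.join_nil, PySem.Chars.join_singleton] at heq
        exact absurd heq.symm (h2 a (List.mem_cons_self ..)).2
      | cons b l2 =>
        rw [PySem.Chars.join_nil, PySem.Chars.join_cons_cons] at heq
        have := congrArg List.length heq
        simp at this
  | cons a l1 ih =>
    intro l2 h1 h2 heq
    cases l2 with
    | nil =>
      cases l1 with
      | nil =>
        rw [PySem.Chars.join_nil, PySem.Chars.join_singleton] at heq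
        exact absurd heq (h1 a (List.mem_cons_self ..)).2
      | cons b l1 =>
        rw [PySem.Chars.join_nil, PySem.Chars.join_cons_cons] at heq
        have := congrArg List.length heq
        simp at this
    | cons c l2 =>
      cases l1 with
      | nil =>
        cases l2 with
        | nil =>
          rw [PySem.Chars.join_singleton, PySem.Chars.join_singleton] at heq
          rw [heq]
        | cons d l2 =>
          rw [PySem.Chars.join_singleton, PySem.Chars.join_cons_cons] at heq
          have hsp : ' ' ∈ (a : List Char) := by
            rw [heq]
            rw [show c ++ [' '] ++ PySem.Chars.join [' '] (d :: l2)
                = c ++ ' ' :: PySem.Chars.join [' '] (d :: l2) by simp]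
            exact List.mem_append.mpr (Or.inr (List.mem_cons_self ..))
          exact absurd hsp (h1 a (List.mem_cons_self ..)).1
      | cons b l1 =>
        cases l2 with
        | nil =>
          rw [PySem.Chars.join_singleton, PySem.Chars.join_cons_cons] at heq
          have hsp : ' ' ∈ (c : List Char) := by
            rw [← heq]
            rw [show a ++ [' '] ++ PySem.Chars.join [' '] (b :: l1)
                = a ++ ' ' :: PySem.Chars.join [' '] (b :: l1) by simp]
            exact List.mem_append.mpr (Or.inr (List.mem_cons_self ..))
          exact absurd hsp (h2 c (List.mem_cons_self ..)).1
        | cons d l2 =>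
          rw [PySem.Chars.join_cons_cons, PySem.Chars.join_cons_cons] at heq
          rw [show a ++ [' '] ++ PySem.Chars.join [' '] (b :: l1)
              = a ++ ' ' :: PySem.Chars.join [' '] (b :: l1) by simp,
            show c ++ [' '] ++ PySem.Chars.join [' '] (d :: l2)
              = c ++ ' ' :: PySem.Chars.join [' '] (d :: l2) by simp] at heq
          have hh := append_sep_inj a c _ _ (h1 a (List.mem_cons_self ..)).1
            (h2 c (List.mem_cons_self ..)).1 heq
          have := ih (d :: l2) (fun w hw => h1 w (List.mem_cons_of_mem _ hw))
            (fun w hw => h2 w (List.mem_cons_of_mem _ hw)) hh.2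
          rw [hh.1, this]

lemma cascade_diff (c : Char) (t : List Char) (hw : cascadeWord (c :: t) = true) :
    R8 (pyCapitalize (c :: t)) ≠ grep bKeys (pyCapitalize (c :: t)) := by
  simp only [cascadeWord, Bool.and_eq_true, Bool.or_eq_true, beq_iff_eq] at hw
  obtain ⟨hc, hpre⟩ := hw
  have hup : PySem.Chars.upperChar c = 'A' ∨ PySem.Chars.upperChar c = 'D' := by
    rcases hc with ((h | h) | h) | h <;> subst h
    · left; decide
    · left; decide
    · right; decide
    · right; decide
  have hnup := noUpper_lower t
  simp only [pyCapitalize]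
  rcases hpre with hp | hp
  · obtain ⟨r, hr⟩ := List.isPrefixOf_iff_prefix.mp hp
    simp only [List.cons_append, List.nil_append] at hr
    rw [← hr]
    rw [← hr] at hnup
    have hnup' : ∀ x ∈ ('o' :: '2' :: r), PySem.Chars.isupper x = false :=
      fun x hx => hnup x (List.mem_cons_of_mem _ hx)
    have hgid : grep bKeys ('o' :: '2' :: r) = 'o' :: '2' :: r :=
      grep_no_upper bKeys bKeys_upper _ hnup'
    rcases hup with hA | hA <;> rw [hA]
    · have hR : R8 ('A' :: 'c' :: 'o' :: '2' :: r) = 'A' :: 'C' :: 'O' :: '₂' :: r := by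
        rw [R8_word _ (by simpa using hnup)]
        simp [fixWord, PySem.Chars.startswith, List.isPrefixOf]
      have hf : bKeys.find? (fun p => p.1.isPrefixOf ('A' :: 'c' :: 'o' :: '2' :: r))
          = some (['A','c'], ['A','C']) := by
        simp [bKeys, List.isPrefixOf]
      have hG : grep bKeys ('A' :: 'c' :: 'o' :: '2' :: r) = 'A' :: 'C' :: 'o' :: '2' :: r := by
        rw [grep_cons_some _ _ _ _ hf]
        simpa using hgid
      rw [hR, hG]
      simp
    · have hR : R8 ('D' :: 'c' :: 'o' :: '2' :: r) = 'D' :: 'C' :: 'O' :: '₂' :: r := by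
        rw [R8_word _ (by simpa using hnup)]
        simp [fixWord, PySem.Chars.startswith, List.isPrefixOf]
      have hf : bKeys.find? (fun p => p.1.isPrefixOf ('D' :: 'c' :: 'o' :: '2' :: r))
          = some (['D','c'], ['D','C']) := by
        simp [bKeys, List.isPrefixOf]
      have hG : grep bKeys ('D' :: 'c' :: 'o' :: '2' :: r) = 'D' :: 'C' :: 'o' :: '2' :: r := by
        rw [grep_cons_some _ _ _ _ hf]
        simpa using hgid
      rw [hR, hG]
      simp
  · obtain ⟨r, hr⟩ := List.isPrefixOf_iff_prefix.mp hp
    simp only [List.cons_append, List.nil_append] at hr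
    rw [← hr]
    rw [← hr] at hnup
    have hnup' : ∀ x ∈ ('c' :: 'g' :: 't' :: r), PySem.Chars.isupper x = false :=
      fun x hx => hnup x (List.mem_cons_of_mem _ hx)
    have hgid : grep bKeys ('c' :: 'g' :: 't' :: r) = 'c' :: 'g' :: 't' :: r :=
      grep_no_upper bKeys bKeys_upper _ hnup'
    rcases hup with hA | hA <;> rw [hA]
    · have hR : R8 ('A' :: 'c' :: 'c' :: 'g' :: 't' :: r)
          = 'A' :: 'C' :: 'C' :: 'G' :: 'T' :: r := by
        rw [R8_word _ (by simpa using hnup)]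
        simp [fixWord, PySem.Chars.startswith, List.isPrefixOf]
      have hf : bKeys.find? (fun p => p.1.isPrefixOf ('A' :: 'c' :: 'c' :: 'g' :: 't' :: r))
          = some (['A','c'], ['A','C']) := by
        simp [bKeys, List.isPrefixOf]
      have hG : grep bKeys ('A' :: 'c' :: 'c' :: 'g' :: 't' :: r)
          = 'A' :: 'C' :: 'c' :: 'g' :: 't' :: r := by
        rw [grep_cons_some _ _ _ _ hf]
        simpa using hgid
      rw [hR, hG]
      simp
    · have hR : R8 ('D' :: 'c' :: 'c' :: 'g' :: 't' :: r)
          = 'D' :: 'C' :: 'C' :: 'G' :: 'T' :: r := by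
        rw [R8_word _ (by simpa using hnup)]
        simp [fixWord, PySem.Chars.startswith, List.isPrefixOf]
      have hf : bKeys.find? (fun p => p.1.isPrefixOf ('D' :: 'c' :: 'c' :: 'g' :: 't' :: r))
          = some (['D','c'], ['D','C']) := by
        simp [bKeys, List.isPrefixOf]
      have hG : grep bKeys ('D' :: 'c' :: 'c' :: 'g' :: 't' :: r)
          = 'D' :: 'C' :: 'c' :: 'g' :: 't' :: r := by
        rw [grep_cons_some _ _ _ _ hf]
        simpa using hgid
      rw [hR, hG]
      simp

-- ===== VERDICT (by name: the statement is the Claim_ definition above) =====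
theorem format_carrier_name_spec : Claim_unchanged_format_carrier_name := by
  intro carrier _ hD
  unfold format_carrier_name format_carrier_name_alt
  simp only [foldl_pyReplacements, R8_join, List.map_map]
  rw [funext bScan_eq_grep, grep_join bKeys bKeys_good, List.map_map]
  congr 1
  apply congrArg
  apply List.map_congr_left
  intro w hw
  have hnc : cascadeWord w = false := by
    unfold D_format_carrier_name at hD
    rw [Bool.not_eq_true, List.any_eq_false] at hD
    simpa using hD w hw
  have hcap := capCascade_of_cap w hnc
  have hR8 : R8 (pyCapitalize w) = fixWord (pyCapitalize w) := by
    apply R8_word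
    cases w with
    | nil => simp [pyCapitalize]
    | cons c t => simpa [pyCapitalize] using noUpper_lower t
  rw [Function.comp_apply, Function.comp_apply, hR8]
  cases hcw : pyCapitalize w with
  | nil => simp [fixWord, grep, PySem.Chars.startswith, List.isPrefixOf]
  | cons c t =>
    rw [← hcw]
    rw [hcw]
    apply (grep_word c t ?_ (hcw ▸ hcap)).symm
    cases w with
    | nil => simp [pyCapitalize] at hcw
    | cons c0 t0 =>
      simp only [pyCapitalize] at hcw
      injection hcw with hc ht
      subst ht
      exact noUpper_lower t0

theorem format_carrier_name_changed : Claim_changed_format_carrier_name := by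
  unfold Claim_changed_format_carrier_name
  refine ⟨by decide, by decide, by decide, ?_, by decide⟩
  unfold format_carrier_name_alt pvDiffWitness_format_carrier_name
  have h1 : PySem.Chars.join [' ']
      ((PySem.Chars.split₀ ("aco2" : String).toList).map pyCapitalize) = ['A','c','o','2'] := by
    decide
  rw [h1]
  have h2 : bScan ['A','c','o','2'] = ['A','C','o','2'] := by simp [bScan]
  rw [h2]
  decide

theorem format_carrier_name_tight : Claim_exact_format_carrier_name := by
  unfold Claim_exact_format_carrier_name
  intro carrier _ hD hEq
  unfold D_format_carrier_name at hD
  rw [List.any_eq_true] at hD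
  obtain ⟨w, hwmem, hwc⟩ := hD
  unfold format_carrier_name format_carrier_name_alt at hEq
  simp only [foldl_pyReplacements, R8_join, List.map_map] at hEq
  rw [funext bScan_eq_grep, grep_join bKeys bKeys_good, List.map_map] at hEq
  replace hEq := congrArg String.toList hEq
  simp only [String.toList_ofList] at hEq
  have hwords := split₀_words carrier.toList
  have hblocks1 : ∀ v ∈ (PySem.Chars.split₀ carrier.toList).map (R8 ∘ pyCapitalize),
      ' ' ∉ v ∧ v ≠ [] := by
    intro v hv
    rw [List.mem_map] at hv
    obtain ⟨u, hu, rfl⟩ := hv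
    have hu' := hwords u hu
    refine ⟨R8_no_space _ (cap_no_space hu'.1), R8_ne_nil _ (cap_ne_nil hu'.2)⟩
  have hblocks2 : ∀ v ∈ (PySem.Chars.split₀ carrier.toList).map (grep bKeys ∘ pyCapitalize),
      ' ' ∉ v ∧ v ≠ [] := by
    intro v hv
    rw [List.mem_map] at hv
    obtain ⟨u, hu, rfl⟩ := hv
    have hu' := hwords u hu
    refine ⟨grep_no_space bKeys (by decide) _ (cap_no_space hu'.1),
      grep_ne_nil bKeys (by decide) _ (cap_ne_nil hu'.2)⟩
  have hmap := join_inj _ _ hblocks1 hblocks2 hEq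
  rw [List.map_inj_left] at hmap
  have := hmap w hwmem
  cases w with
  | nil => simp [cascadeWord] at hwc
  | cons c t => exact cascade_diff c t hwc this
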